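-- pv_equiv track=rewrite | github.com/BuciakxD/Knight-on-chess-board | knight on chess board.py | vytvor_sachovnicu
-- ===== SOURCE A (Python) =====
-- def vytvor_sachovnicu(r, s):
--     sachovnica = (r+4)*[""]
--     for i in range (r+4):
--         sachovnica[i] = (s+4)*[True]
--     for i in range(s+4):
--         sachovnica[0][i]=False
--         sachovnica[1][i]=False
--         sachovnica[r+2][i]=False
--         sachovnica[r+3][i]=False
--     for i in range(r+4):
--         sachovnica[i][0]=False
--         sachovnica[i][1]=False
--         sachovnica[i][s+2]=False
--         sachovnica[i][s+3]=False
--     return sachovnica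
-- ===== SOURCE B (Python) =====
-- def vytvor_sachovnicu(r, s):
--     inner = [2 <= j < s + 2 for j in range(s + 4)]
--     blank = [False] * (s + 4)
--     return [inner[:] if 2 <= i < r + 2 else blank[:] for i in range(r + 4)]
-- ===== Notes on version B (the rewrite author's own statement) =====
-- stated objective: simpler
-- what changed: B derives each row from the border predicate in a single pass (a precomputed interior-row template 2<=j<s+2, selected per row by 2<=i<r+2), replacing A's three passes: all-True fill, then overwriting the border rows, then the border columns.
import Mathlib
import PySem

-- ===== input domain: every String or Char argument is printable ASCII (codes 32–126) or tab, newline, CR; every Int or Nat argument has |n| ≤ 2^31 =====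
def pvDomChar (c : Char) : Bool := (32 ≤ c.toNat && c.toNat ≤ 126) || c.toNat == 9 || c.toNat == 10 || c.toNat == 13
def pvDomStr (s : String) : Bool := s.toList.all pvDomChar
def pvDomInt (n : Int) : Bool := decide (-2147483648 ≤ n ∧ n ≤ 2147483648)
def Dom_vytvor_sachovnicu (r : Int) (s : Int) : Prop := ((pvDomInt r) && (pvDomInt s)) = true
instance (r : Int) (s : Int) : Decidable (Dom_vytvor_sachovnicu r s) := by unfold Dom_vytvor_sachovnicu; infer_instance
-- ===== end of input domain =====

-- B builds the board in one nested pass from a border predicate instead of A's fill-then-overwrite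
-- three passes (objective: simpler).

-- ===== PORT A =====
-- sachovnica[i][j] = v : read row i with pyGetD, set column j, write the row back with pySetD
-- (exact wherever both indices are in range, which Pre_ guarantees for every write A performs).
def pvSetCell (b : List (List Bool)) (i j : Int) (v : Bool) : List (List Bool) :=
  PySem.List.pySetD b i (PySem.List.pySetD (PySem.List.pyGetD b i []) j v)


def vytvor_sachovnicu (r : Int) (s : Int) : List (List Bool) :=
  -- sachovnica = (r+4)*[""] : placeholder rows, each one overwritten by the first loop
  -- (ported as empty rows, since Lean's list is homogeneous; the placeholders are never read)
  let sachovnica : List (List Bool) := List.replicate (r+4).toNat []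
  let sachovnica := (PySem.List.pyRange 0 (r+4) 1).foldl
    (fun b i => PySem.List.pySetD b i (List.replicate (s+4).toNat true)) sachovnica
  let sachovnica := (PySem.List.pyRange 0 (s+4) 1).foldl
    (fun b i =>
      pvSetCell (pvSetCell (pvSetCell (pvSetCell b 0 i false) 1 i false) (r+2) i false) (r+3) i false)
    sachovnica
  (PySem.List.pyRange 0 (r+4) 1).foldl
    (fun b i =>
      pvSetCell (pvSetCell (pvSetCell (pvSetCell b i 0 false) i 1 false) i (s+2) false) i (s+3) false)
    sachovnica


-- ===== PORT B =====
def vytvor_sachovnicu_alt (r : Int) (s : Int) : List (List Bool) :=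
  -- inner[:] / blank[:] are value copies in Python; copying is the identity on immutable Lean lists
  let inner := (PySem.List.pyRange 0 (s+4) 1).map (fun j => decide (2 ≤ j ∧ j < s + 2))
  let blank := List.replicate (s+4).toNat false
  (PySem.List.pyRange 0 (r+4) 1).map (fun i => if 2 ≤ i ∧ i < r + 2 then inner else blank)

-- ===== PRECONDITION & SPEC =====
-- Pre_ excludes exactly the inputs on which A raises IndexError (an out-of-range border write);
-- on every input A returns on (r,s ≥ -2, or r,s ≤ -4 where A returns []) Pre_ holds.
def Pre_vytvor_sachovnicu (r : Int) (s : Int) : Prop :=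
  (-2 ≤ r ∧ -2 ≤ s) ∨ (r ≤ -4 ∧ s ≤ -4)
instance (r : Int) (s : Int) : Decidable (Pre_vytvor_sachovnicu r s) := by
  unfold Pre_vytvor_sachovnicu; infer_instance

def pvWitness_vytvor_sachovnicu : Int × Int := (3, 3)

def Spec_vytvor_sachovnicu (r : Int) (s : Int) (out : List (List Bool)) : Prop := out = vytvor_sachovnicu_alt r s
instance (r : Int) (s : Int) (out : List (List Bool)) : Decidable (Spec_vytvor_sachovnicu r s out) := by unfold Spec_vytvor_sachovnicu; infer_instance

-- ===== CLAIM (what is proved, stated in full; the proofs are below) =====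
def Claim_equal_vytvor_sachovnicu : Prop := ∀ (r : Int) (s : Int), Dom_vytvor_sachovnicu r s → Pre_vytvor_sachovnicu r s → Spec_vytvor_sachovnicu r s (vytvor_sachovnicu r s)

-- ===== LEMMAS AND PROOFS =====

def pvCell (b : List (List Bool)) (i j : Nat) : Bool := (b.getD i []).getD j false

theorem pySetD_nat {α : Type} (xs : List α) (n : Nat) (h : n < xs.length) (v : α) :
    PySem.List.pySetD xs (n:Int) v = xs.set n v := by
  simp [PySem.List.pySetD, PySem.List.pySet?_natCast xs n v h]

theorem getD_set {α : Type} (l : List α) (n k : Nat) (a d : α) :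
    (l.set n a).getD k d = if n = k ∧ n < l.length then a else l.getD k d := by
  simp only [List.getD, List.getElem?_set]
  split_ifs with h1 h2 h3 h3 <;> simp_all
  omega

theorem pvSetCell_eq (b : List (List Bool)) (i j : Nat) (hi : i < b.length)
    (hj : j < (b.getD i []).length) (v : Bool) :
    pvSetCell b (i:Int) (j:Int) v = b.set i ((b.getD i []).set j v) := by
  unfold pvSetCell
  rw [PySem.List.pyGetD_natCast b i [], pySetD_nat _ j hj, pySetD_nat _ i hi]

theorem pvSetCell_all (b : List (List Bool)) (i j : Nat) (hi : i < b.length)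
    (hj : j < (b.getD i []).length) (v : Bool) :
    (pvSetCell b (i:Int) (j:Int) v).length = b.length ∧
    (∀ k, ((pvSetCell b (i:Int) (j:Int) v).getD k []).length = (b.getD k []).length) ∧
    (∀ k m, pvCell (pvSetCell b (i:Int) (j:Int) v) k m
      = if k = i ∧ m = j then v else pvCell b k m) := by
  rw [pvSetCell_eq b i j hi hj v]
  refine ⟨by simp, ?_, ?_⟩
  · intro k
    rw [getD_set]
    split_ifs with h
    · rw [← h.1]; simp
    · rfl
  · intro k m
    unfold pvCell
    rw [getD_set]
    by_cases hk : k = i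
    · subst hk
      rw [if_pos (show k = k ∧ k < b.length from ⟨rfl, hi⟩), getD_set]
      by_cases hm : m = j
      · subst hm
        rw [if_pos (show m = m ∧ m < (b.getD k []).length from ⟨rfl, hj⟩),
            if_pos (show k = k ∧ m = m from ⟨rfl, rfl⟩)]
      · rw [if_neg (fun hc => hm hc.1.symm), if_neg (fun hc => hm hc.2)]
    · rw [if_neg (fun hc => hk hc.1.symm), if_neg (fun hc => hk hc.1)]

theorem loop1_lemma {α : Type} (c : α) (n : Nat) : ∀ (l : List α), n ≤ l.length →
    (PySem.List.pyRange 0 (n:Int) 1).foldl (fun b i => PySem.List.pySetD b i c) l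
      = List.replicate n c ++ l.drop n := by
  induction n with
  | zero => intro l _; simp
  | succ n ih =>
    intro l h
    have hc : ((n+1 : Nat) : Int) = (n:Int) + 1 := by push_cast; ring
    rw [hc, PySem.List.pyRange_one_succ_right (by positivity), List.foldl_append]
    rw [ih l (by omega)]
    simp only [List.foldl_cons, List.foldl_nil]
    rw [pySetD_nat _ n (by simp; omega) c]
    rw [List.set_append_right _ _ (by simp)]
    simp only [List.length_replicate, Nat.sub_self]
    rw [List.drop_eq_getElem_cons (by omega : n < l.length), List.set_cons_zero]
    simp [List.replicate_succ' (n := n) (a := c), List.append_assoc]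

theorem step2 (r : Int) (N M : Nat) (hNr : (N:Int) = r+4) (hN : 2 ≤ N) (t : Nat) (htM : t < M)
    (b : List (List Bool)) (hb : b.length = N) (hrow : ∀ k, k < N → (b.getD k []).length = M) :
    (pvSetCell (pvSetCell (pvSetCell (pvSetCell b 0 (t:Int) false) 1 (t:Int) false) (r+2) (t:Int) false) (r+3) (t:Int) false).length = N ∧
    (∀ k, k < N → ((pvSetCell (pvSetCell (pvSetCell (pvSetCell b 0 (t:Int) false) 1 (t:Int) false) (r+2) (t:Int) false) (r+3) (t:Int) false).getD k []).length = M) ∧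
    (∀ i j, pvCell (pvSetCell (pvSetCell (pvSetCell (pvSetCell b 0 (t:Int) false) 1 (t:Int) false) (r+2) (t:Int) false) (r+3) (t:Int) false) i j
      = if (i = 0 ∨ i = 1 ∨ i + 2 = N ∨ i + 1 = N) ∧ j = t then false else pvCell b i j) := by
  have e0 : (0:Int) = ((0:Nat):Int) := by simp
  have e1 : (1:Int) = ((1:Nat):Int) := by simp
  have e2 : r+2 = ((N-2:Nat):Int) := by omega
  have e3 : r+3 = ((N-1:Nat):Int) := by omega
  rw [e0, e1, e2, e3]
  obtain ⟨L1, R1, C1⟩ := pvSetCell_all b 0 t (by omega) (by rw [hrow 0 (by omega)]; omega) false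
  set b1 := pvSetCell b ((0:Nat):Int) (t:Int) false with hb1
  obtain ⟨L2, R2, C2⟩ := pvSetCell_all b1 1 t (by rw [L1]; omega) (by rw [R1, hrow 1 (by omega)]; omega) false
  set b2 := pvSetCell b1 ((1:Nat):Int) (t:Int) false with hb2
  obtain ⟨L3, R3, C3⟩ := pvSetCell_all b2 (N-2) t (by rw [L2, L1]; omega) (by rw [R2, R1, hrow (N-2) (by omega)]; omega) false
  set b3 := pvSetCell b2 ((N-2:Nat):Int) (t:Int) false with hb3
  obtain ⟨L4, R4, C4⟩ := pvSetCell_all b3 (N-1) t (by rw [L3, L2, L1]; omega) (by rw [R3, R2, R1, hrow (N-1) (by omega)]; omega) false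
  refine ⟨by rw [L4, L3, L2, L1, hb], ?_, ?_⟩
  · intro k hk
    rw [R4, R3, R2, R1]; exact hrow k hk
  · intro i j
    rw [C4, C3, C2, C1]
    split_ifs <;> first | rfl | omega

theorem step3 (s : Int) (N M : Nat) (hMs : (M:Int) = s+4) (hM : 2 ≤ M) (t : Nat) (htN : t < N)
    (b : List (List Bool)) (hb : b.length = N) (hrow : ∀ k, k < N → (b.getD k []).length = M) :
    (pvSetCell (pvSetCell (pvSetCell (pvSetCell b (t:Int) 0 false) (t:Int) 1 false) (t:Int) (s+2) false) (t:Int) (s+3) false).length = N ∧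
    (∀ k, k < N → ((pvSetCell (pvSetCell (pvSetCell (pvSetCell b (t:Int) 0 false) (t:Int) 1 false) (t:Int) (s+2) false) (t:Int) (s+3) false).getD k []).length = M) ∧
    (∀ i j, pvCell (pvSetCell (pvSetCell (pvSetCell (pvSetCell b (t:Int) 0 false) (t:Int) 1 false) (t:Int) (s+2) false) (t:Int) (s+3) false) i j
      = if i = t ∧ (j = 0 ∨ j = 1 ∨ j + 2 = M ∨ j + 1 = M) then false else pvCell b i j) := by
  have e0 : (0:Int) = ((0:Nat):Int) := by simp
  have e1 : (1:Int) = ((1:Nat):Int) := by simp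
  have e2 : s+2 = ((M-2:Nat):Int) := by omega
  have e3 : s+3 = ((M-1:Nat):Int) := by omega
  rw [e0, e1, e2, e3]
  obtain ⟨L1, R1, C1⟩ := pvSetCell_all b t 0 (by omega) (by rw [hrow t htN]; omega) false
  set b1 := pvSetCell b (t:Int) ((0:Nat):Int) false with hb1
  obtain ⟨L2, R2, C2⟩ := pvSetCell_all b1 t 1 (by rw [L1]; omega) (by rw [R1, hrow t htN]; omega) false
  set b2 := pvSetCell b1 (t:Int) ((1:Nat):Int) false with hb2
  obtain ⟨L3, R3, C3⟩ := pvSetCell_all b2 t (M-2) (by rw [L2, L1]; omega) (by rw [R2, R1, hrow t htN]; omega) false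
  set b3 := pvSetCell b2 (t:Int) ((M-2:Nat):Int) false with hb3
  obtain ⟨L4, R4, C4⟩ := pvSetCell_all b3 t (M-1) (by rw [L3, L2, L1]; omega) (by rw [R3, R2, R1, hrow t htN]; omega) false
  refine ⟨by rw [L4, L3, L2, L1, hb], ?_, ?_⟩
  · intro k hk
    rw [R4, R3, R2, R1]; exact hrow k hk
  · intro i j
    rw [C4, C3, C2, C1]
    split_ifs <;> first | rfl | omega

def pvLoop2 (r : Int) (init : List (List Bool)) (t : Nat) : List (List Bool) :=
  (PySem.List.pyRange 0 (t:Int) 1).foldl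
    (fun b i => pvSetCell (pvSetCell (pvSetCell (pvSetCell b 0 i false) 1 i false) (r+2) i false) (r+3) i false)
    init

def pvLoop3 (s : Int) (init : List (List Bool)) (t : Nat) : List (List Bool) :=
  (PySem.List.pyRange 0 (t:Int) 1).foldl
    (fun b i => pvSetCell (pvSetCell (pvSetCell (pvSetCell b i 0 false) i 1 false) i (s+2) false) i (s+3) false)
    init

theorem pvLoop2_succ (r : Int) (init : List (List Bool)) (t : Nat) :
    pvLoop2 r init (t+1) = (fun b (i : Int) => pvSetCell (pvSetCell (pvSetCell (pvSetCell b 0 i false) 1 i false) (r+2) i false) (r+3) i false) (pvLoop2 r init t) (t:Int) := by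
  unfold pvLoop2
  have hc : ((t+1 : Nat) : Int) = (t:Int) + 1 := by push_cast; ring
  rw [hc, PySem.List.pyRange_one_succ_right (by positivity), List.foldl_append]
  rfl

theorem pvLoop3_succ (s : Int) (init : List (List Bool)) (t : Nat) :
    pvLoop3 s init (t+1) = (fun b (i : Int) => pvSetCell (pvSetCell (pvSetCell (pvSetCell b i 0 false) i 1 false) i (s+2) false) i (s+3) false) (pvLoop3 s init t) (t:Int) := by
  unfold pvLoop3
  have hc : ((t+1 : Nat) : Int) = (t:Int) + 1 := by push_cast; ring
  rw [hc, PySem.List.pyRange_one_succ_right (by positivity), List.foldl_append]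
  rfl

theorem loop2_inv (r : Int) (N M : Nat) (hNr : (N:Int) = r+4) (hN : 2 ≤ N)
    (t : Nat) (ht : t ≤ M) :
    (pvLoop2 r (List.replicate N (List.replicate M true)) t).length = N ∧
    (∀ k, k < N → ((pvLoop2 r (List.replicate N (List.replicate M true)) t).getD k []).length = M) ∧
    (∀ i j, i < N → j < M → pvCell (pvLoop2 r (List.replicate N (List.replicate M true)) t) i j
      = (!(decide (i = 0 ∨ i = 1 ∨ i + 2 = N ∨ i + 1 = N)) || !(decide (j < t)))) := by
  induction t with
  | zero =>
    unfold pvLoop2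
    simp only [Nat.cast_zero, PySem.List.pyRange_one_eq_nil (by omega : (0:Int) ≤ 0), List.foldl_nil]
    refine ⟨by simp, ?_, ?_⟩
    · intro k hk
      simp [List.getD, hk]
    · intro i j hi hj
      simp [pvCell, List.getD, hi, hj]
  | succ t ih =>
    obtain ⟨ihL, ihR, ihC⟩ := ih (by omega)
    obtain ⟨L, R, C⟩ := step2 r N M hNr hN t (by omega) _ ihL ihR
    rw [pvLoop2_succ]
    refine ⟨L, R, ?_⟩
    intro i j hi hj
    rw [C i j]
    split_ifs with h
    · simp [h.1, h.2]
    · rw [ihC i j hi hj]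
      by_cases hbr : (i = 0 ∨ i = 1 ∨ i + 2 = N ∨ i + 1 = N)
      · have hjt : j ≠ t := fun e => h ⟨hbr, e⟩
        simp only [hbr, decide_true, Bool.not_true, Bool.false_or]
        have hd : decide (j < t) = decide (j < t + 1) := by
          rw [decide_eq_decide]; omega
        rw [hd]
      · simp [hbr]

theorem loop3_inv (s : Int) (N M : Nat) (hMs : (M:Int) = s+4) (hM : 2 ≤ M)
    (b0 : List (List Bool)) (hL : b0.length = N) (hR : ∀ k, k < N → ((b0.getD k []).length = M))
    (hC : ∀ i j, i < N → j < M → pvCell b0 i j = !(decide (i = 0 ∨ i = 1 ∨ i + 2 = N ∨ i + 1 = N)))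
    (t : Nat) (ht : t ≤ N) :
    (pvLoop3 s b0 t).length = N ∧
    (∀ k, k < N → ((pvLoop3 s b0 t).getD k []).length = M) ∧
    (∀ i j, i < N → j < M → pvCell (pvLoop3 s b0 t) i j
      = if i < t
        then (!(decide (i = 0 ∨ i = 1 ∨ i + 2 = N ∨ i + 1 = N)) && !(decide (j = 0 ∨ j = 1 ∨ j + 2 = M ∨ j + 1 = M)))
        else !(decide (i = 0 ∨ i = 1 ∨ i + 2 = N ∨ i + 1 = N))) := by
  induction t with
  | zero =>
    unfold pvLoop3
    simp only [Nat.cast_zero, PySem.List.pyRange_one_eq_nil (by omega : (0:Int) ≤ 0), List.foldl_nil]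
    refine ⟨hL, hR, ?_⟩
    intro i j hi hj
    simp [hC i j hi hj]
  | succ t ih =>
    obtain ⟨ihL, ihR, ihC⟩ := ih (by omega)
    obtain ⟨L, R, C⟩ := step3 s N M hMs hM t (by omega) _ ihL ihR
    rw [pvLoop3_succ]
    refine ⟨L, R, ?_⟩
    intro i j hi hj
    rw [C i j, ihC i j hi hj]
    by_cases hit : i = t
    · subst hit
      by_cases hbc : (j = 0 ∨ j = 1 ∨ j + 2 = M ∨ j + 1 = M)
      · simp [hbc]
      · simp [hbc]
    · rw [if_neg (fun hc => hit hc.1)]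
      split_ifs with h6 h7 <;> first | rfl | omega

theorem board_ext (N M : Nat) (a b : List (List Bool)) (ha : a.length = N) (hb : b.length = N)
    (hra : ∀ k, k < N → (a.getD k []).length = M) (hrb : ∀ k, k < N → (b.getD k []).length = M)
    (hc : ∀ i j, i < N → j < M → pvCell a i j = pvCell b i j) : a = b := by
  apply List.ext_getElem (by omega)
  intro i h1 h2
  have hi : i < N := by omega
  have hga : a[i] = a.getD i [] := (List.getD_eq_getElem a [] h1).symm
  have hgb : b[i] = b.getD i [] := (List.getD_eq_getElem b [] h2).symm
  rw [hga, hgb]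
  apply List.ext_getElem (by rw [hra i hi, hrb i hi])
  intro j hj1 hj2
  have hj : j < M := by rw [hra i hi] at hj1; exact hj1
  have h1' : (a.getD i [])[j] = pvCell a i j := (List.getD_eq_getElem _ false hj1).symm
  have h2' : (b.getD i [])[j] = pvCell b i j := (List.getD_eq_getElem _ false hj2).symm
  rw [h1', h2', hc i j hi hj]

theorem alt_closed (r s : Int) (N M : Nat) (hNr : (N:Int) = r+4) (hMs : (M:Int) = s+4) :
    vytvor_sachovnicu_alt r s = (List.range N).map (fun (i : Nat) =>
      if 2 ≤ (i:Int) ∧ (i:Int) < r + 2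
      then (List.range M).map (fun (j : Nat) => decide (2 ≤ (j:Int) ∧ (j:Int) < s + 2))
      else List.replicate M false) := by
  unfold vytvor_sachovnicu_alt
  rw [show r+4 = (N:Int) by omega, show s+4 = (M:Int) by omega]
  simp only [Int.toNat_natCast, PySem.List.pyRange_one, sub_zero, List.map_map, zero_add]
  rfl

theorem alt_char (r s : Int) (N M : Nat) (hNr : (N:Int) = r+4) (hMs : (M:Int) = s+4) :
    (vytvor_sachovnicu_alt r s).length = N ∧
    (∀ k, k < N → ((vytvor_sachovnicu_alt r s).getD k []).length = M) ∧
    (∀ i j, i < N → j < M → pvCell (vytvor_sachovnicu_alt r s) i j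
      = (decide (2 ≤ (i:Int) ∧ (i:Int) < r + 2) && decide (2 ≤ (j:Int) ∧ (j:Int) < s + 2))) := by
  rw [alt_closed r s N M hNr hMs]
  refine ⟨by simp, ?_, ?_⟩
  · intro k hk
    rw [List.getD_eq_getElem _ [] (by simpa using hk)]
    simp only [List.getElem_map, List.getElem_range]
    split_ifs <;> simp
  · intro i j hi hj
    unfold pvCell
    rw [List.getD_eq_getElem _ [] (by simpa using hi)]
    simp only [List.getElem_map, List.getElem_range]
    by_cases hrp : 2 ≤ (i:Int) ∧ (i:Int) < r + 2
    · rw [if_pos hrp]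
      rw [List.getD_eq_getElem _ false (by simpa using hj)]
      simp [hrp]
    · rw [if_neg hrp]
      rw [List.getD_eq_getElem _ false (by simpa using hj)]
      simp only [List.getElem_replicate]
      symm
      simp only [Bool.and_eq_false_iff, decide_eq_false_iff_not]
      omega

theorem pv_main (r s : Int) (hr : -2 ≤ r) (hs : -2 ≤ s) :
    vytvor_sachovnicu r s = vytvor_sachovnicu_alt r s := by
  have hNr : (((r+4).toNat : Nat) : Int) = r+4 := Int.toNat_of_nonneg (by omega)
  have hMs : (((s+4).toNat : Nat) : Int) = s+4 := Int.toNat_of_nonneg (by omega)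
  set N := (r+4).toNat with hN'
  set M := (s+4).toNat with hM'
  have hN : 2 ≤ N := by omega
  have hM : 2 ≤ M := by omega
  have hA : vytvor_sachovnicu r s
      = pvLoop3 s (pvLoop2 r (List.replicate N (List.replicate M true)) M) N := by
    unfold vytvor_sachovnicu pvLoop2 pvLoop3
    rw [show r+4 = (N:Int) from hNr.symm, show s+4 = (M:Int) from hMs.symm]
    simp only [Int.toNat_natCast]
    rw [loop1_lemma (List.replicate M true) N (List.replicate N []) (by simp)]
    simp
  obtain ⟨L2, R2, C2⟩ := loop2_inv r N M hNr hN M le_rfl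
  have hC0 : ∀ i j, i < N → j < M →
      pvCell (pvLoop2 r (List.replicate N (List.replicate M true)) M) i j
        = !(decide (i = 0 ∨ i = 1 ∨ i + 2 = N ∨ i + 1 = N)) := by
    intro i j hi hj
    rw [C2 i j hi hj]
    simp [hj]
  obtain ⟨L3, R3, C3⟩ := loop3_inv s N M hMs hM _ L2 R2 hC0 N le_rfl
  obtain ⟨La, Ra, Ca⟩ := alt_char r s N M hNr hMs
  rw [hA]
  apply board_ext N M _ _ L3 La R3 Ra
  intro i j hi hj
  rw [C3 i j hi hj, Ca i j hi hj, if_pos hi]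
  have h1 : (!(decide (i = 0 ∨ i = 1 ∨ i + 2 = N ∨ i + 1 = N)))
      = decide (2 ≤ (i:Int) ∧ (i:Int) < r+2) := by
    rw [← decide_not, decide_eq_decide]; omega
  have h2 : (!(decide (j = 0 ∨ j = 1 ∨ j + 2 = M ∨ j + 1 = M)))
      = decide (2 ≤ (j:Int) ∧ (j:Int) < s+2) := by
    rw [← decide_not, decide_eq_decide]; omega
  rw [h1, h2]

theorem pv_empty (r s : Int) (hr : r ≤ -4) (hs : s ≤ -4) :
    vytvor_sachovnicu r s = vytvor_sachovnicu_alt r s := by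
  unfold vytvor_sachovnicu vytvor_sachovnicu_alt
  rw [PySem.List.pyRange_one_eq_nil (by omega : r+4 ≤ 0),
      PySem.List.pyRange_one_eq_nil (by omega : s+4 ≤ 0)]
  simp [Int.toNat_of_nonpos (by omega : r+4 ≤ 0)]

-- ===== VERDICT (by name: the statement is the Claim_ definition above) =====
theorem vytvor_sachovnicu_spec : Claim_equal_vytvor_sachovnicu := by
  intro r s _ hpre
  unfold Spec_vytvor_sachovnicu
  rcases hpre with ⟨hr, hs⟩ | ⟨hr, hs⟩
  · exact pv_main r s hr hs
  · exact pv_empty r s hr hs
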